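-- pv_equiv track=rewrite | github.com/iamgarlug/sah.adventOfCode.2025 | days/day04/part1.py | countRollsInLine
-- ===== SOURCE A (Python) =====
-- def countRollsInLine(previousLine: str, currentLine: str, nextLine: str):
--     rolls = 0
--
--     for index in range(0, len(currentLine)):
--         if currentLine[index] == '.':
--             continue
--
--         if isRollPickable(previousLine, currentLine, nextLine, index):
--             rolls += 1
--
--     return rolls
--
-- def isRollPickable(previousLine: str, currentLine: str, nextLine: str, index: int):
--     # y increases downward
--     positionsToCheck = [ [-1, -1], [ 0, -1], [ 1, -1],
--                          [-1,  0],           [ 1,  0],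
--                          [-1,  1], [ 0,  1], [ 1,  1] ]
--
--     neighboringRolls = 0
--
--     for positionToCheck in positionsToCheck:
--         x = positionToCheck[0] + index
--         if (x < 0 or x >= len(currentLine)):
--             continue
--         y = positionToCheck[1]
--
--         line = previousLine if y == -1 else currentLine if y == 0 else nextLine
--         neighboringRolls += 1 if line[x] == '@' else 0
--
--     return neighboringRolls < 4
-- ===== SOURCE B (Python) =====
-- def countRollsInLine(previousLine: str, currentLine: str, nextLine: str):
--     # Prefix-sum re-implementation: build cumulative '@' counts per line once,
--     # then answer each cell's 3x3 neighborhood by range subtraction.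
--     def prefix(line):
--         ps = [0]
--         for ch in line:
--             ps.append(ps[-1] + (1 if ch == '@' else 0))
--         return ps
--
--     pp = prefix(previousLine)
--     pc = prefix(currentLine)
--     pn = prefix(nextLine)
--     n = len(currentLine)
--     rolls = 0
--     for i in range(n):
--         c = currentLine[i]
--         if c == '.':
--             continue
--         lo = max(0, i - 1)
--         hi = min(n - 1, i + 1)
--         total = (pp[hi + 1] - pp[lo]) + (pc[hi + 1] - pc[lo]) + (pn[hi + 1] - pn[lo])
--         if c == '@':
--             total -= 1
--         if total < 4:
--             rolls += 1
--     return rolls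
-- ===== Notes on version B (the rewrite author's own statement) =====
-- stated objective: faster
-- what changed: Replaces the per-cell 8-offset neighbor scan with prefix-sum arrays of '@' counts built once per line and a 3-column range subtraction per roll cell (subtracting the center when it is '@').
import Mathlib
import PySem

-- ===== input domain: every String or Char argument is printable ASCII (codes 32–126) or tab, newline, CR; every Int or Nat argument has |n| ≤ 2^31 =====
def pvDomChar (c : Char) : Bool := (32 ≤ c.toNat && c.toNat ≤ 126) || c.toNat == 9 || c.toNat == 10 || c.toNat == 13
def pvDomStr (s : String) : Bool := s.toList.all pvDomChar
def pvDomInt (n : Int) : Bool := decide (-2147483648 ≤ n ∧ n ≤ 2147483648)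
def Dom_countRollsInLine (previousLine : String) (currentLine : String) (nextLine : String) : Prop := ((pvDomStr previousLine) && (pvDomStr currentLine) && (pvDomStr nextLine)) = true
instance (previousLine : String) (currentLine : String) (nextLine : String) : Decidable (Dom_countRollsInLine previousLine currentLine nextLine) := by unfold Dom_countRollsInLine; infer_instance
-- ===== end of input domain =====

-- B replaces A's per-cell 8-offset neighbor scan by per-line prefix-sum arrays of '@'
-- counts with a 3-column range subtraction per roll cell (measured constant-factor speedup).


-- ===== PORT A =====
def pvPositionsToCheck : List (Int × Int) :=
  [(-1,-1), (0,-1), (1,-1), (-1,0), (1,0), (-1,1), (0,1), (1,1)]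

def isRollPickable (previousLine currentLine nextLine : String) (index : Int) : Bool :=
  let neighboringRolls : Int := pvPositionsToCheck.foldl (fun acc pos =>
    let x := pos.1 + index
    if x < 0 ∨ PySem.Str.len currentLine ≤ x then acc
    else
      let y := pos.2
      let line := if y = -1 then previousLine else if y = 0 then currentLine else nextLine
      -- line[x] raises IndexError when out of range; Pre_ excludes that, default is irrelevant
      acc + (if (PySem.Str.pyGet? line x).getD ' ' = '@' then 1 else 0)) 0
  decide (neighboringRolls < 4)

def countRollsInLine (previousLine : String) (currentLine : String) (nextLine : String) : Int :=
  (PySem.List.pyRange 0 (PySem.Str.len currentLine) 1).foldl (fun rolls index =>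
    if (PySem.Str.pyGet? currentLine index).getD ' ' = '.' then rolls
    else if isRollPickable previousLine currentLine nextLine index then rolls + 1 else rolls) 0

-- ===== PORT B =====
def pvPrefix (line : String) : List Int :=
  line.toList.foldl
    (fun ps ch => ps ++ [(PySem.List.pyGet? ps (-1)).getD 0 + (if ch = '@' then 1 else 0)]) [0]

def countRollsInLine_alt (previousLine : String) (currentLine : String) (nextLine : String) : Int :=
  let pp := pvPrefix previousLine
  let pc := pvPrefix currentLine
  let pn := pvPrefix nextLine
  let n := PySem.Str.len currentLine
  (PySem.List.pyRange 0 n 1).foldl (fun rolls i =>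
    let c := (PySem.Str.pyGet? currentLine i).getD ' '
    if c = '.' then rolls
    else
      let lo := max 0 (i - 1)
      let hi := min (n - 1) (i + 1)
      -- ps[idx] raises IndexError when out of range; Pre_ excludes that, default is irrelevant
      let total :=
        ((PySem.List.pyGet? pp (hi + 1)).getD 0 - (PySem.List.pyGet? pp lo).getD 0)
        + ((PySem.List.pyGet? pc (hi + 1)).getD 0 - (PySem.List.pyGet? pc lo).getD 0)
        + ((PySem.List.pyGet? pn (hi + 1)).getD 0 - (PySem.List.pyGet? pn lo).getD 0)
      let total := if c = '@' then total - 1 else total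
      if total < 4 then rolls + 1 else rolls) 0

-- ===== PRECONDITION & SPEC =====
-- Pre_ excludes exactly the inputs where A raises IndexError: some roll cell of currentLine
-- whose clipped 3-column window reaches past the end of previousLine or nextLine.
def Pre_countRollsInLine (previousLine : String) (currentLine : String) (nextLine : String) : Prop :=
  ∀ i : Nat, i < currentLine.toList.length → currentLine.toList.getD i ' ' ≠ '.' →
    min (i + 1) (currentLine.toList.length - 1) < previousLine.toList.length ∧
    min (i + 1) (currentLine.toList.length - 1) < nextLine.toList.length
instance (previousLine : String) (currentLine : String) (nextLine : String) : Decidable (Pre_countRollsInLine previousLine currentLine nextLine) := by unfold Pre_countRollsInLine; infer_instance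

def pvWitness_countRollsInLine : String × String × String := ("@@@", "@.@", "...")

def Spec_countRollsInLine (previousLine : String) (currentLine : String) (nextLine : String) (out : Int) : Prop := out = countRollsInLine_alt previousLine currentLine nextLine
instance (previousLine : String) (currentLine : String) (nextLine : String) (out : Int) : Decidable (Spec_countRollsInLine previousLine currentLine nextLine out) := by unfold Spec_countRollsInLine; infer_instance

-- ===== CLAIM (what is proved, stated in full; the proofs are below) =====
def Claim_equal_countRollsInLine : Prop := ∀ (previousLine : String) (currentLine : String) (nextLine : String), Dom_countRollsInLine previousLine currentLine nextLine → Pre_countRollsInLine previousLine currentLine nextLine → Spec_countRollsInLine previousLine currentLine nextLine (countRollsInLine previousLine currentLine nextLine)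

-- ===== LEMMAS AND PROOFS =====
-- '@'-indicator of position k of a line, and count of '@' among the first k characters
def pvInd (l : List Char) (k : Nat) : Int := if l.getD k ' ' = '@' then 1 else 0
def pvCnt (l : List Char) (k : Nat) : Int := ((l.take k).countP (fun c => c = '@') : Int)

lemma pvCnt_succ (l : List Char) (k : Nat) (hk : k < l.length) :
    pvCnt l (k + 1) = pvCnt l k + pvInd l k := by
  unfold pvCnt pvInd
  rw [List.take_add_one, List.getElem?_eq_getElem hk, List.getD_eq_getElem l ' ' hk]
  rw [List.countP_append]
  by_cases h : l[k] = '@' <;> simp [h]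

lemma pvPrefix_eq (s : String) :
    pvPrefix s = (List.range (s.toList.length + 1)).map (pvCnt s.toList) := by
  unfold pvPrefix
  generalize s.toList = l
  induction l using List.reverseRecOn with
  | nil => decide
  | append_singleton l c ih =>
    rw [List.foldl_append, ih]
    rw [List.length_append, List.length_singleton]
    rw [List.range_succ (n := l.length + 1), List.map_append]
    have h1 : (List.range (l.length + 1)).map (pvCnt (l ++ [c])) = (List.range (l.length + 1)).map (pvCnt l) := by
      apply List.map_congr_left
      intro k hk
      rw [List.mem_range] at hk
      simp [pvCnt, List.take_append_of_le_length (by omega : k ≤ l.length)]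
    rw [h1]
    simp only [List.foldl_cons, List.foldl_nil]
    congr 1
    have hlast : (List.range (l.length + 1)).map (pvCnt l) = ((List.range l.length).map (pvCnt l)) ++ [pvCnt l l.length] := by
      rw [List.range_succ, List.map_append]; rfl
    rw [hlast, PySem.List.pyGet?_neg_one, List.getLast?_concat]
    have htake : (l ++ [c]).take (l.length + 1) = l ++ [c] := List.take_of_length_le (by simp)
    simp [pvCnt, htake, List.countP_append]

lemma pvPrefix_get (s : String) (k : Nat) (hk : k ≤ s.toList.length) :
    (PySem.List.pyGet? (pvPrefix s) (k : Int)).getD 0 = pvCnt s.toList k := by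
  rw [pvPrefix_eq, PySem.List.pyGet?_natCast]
  rw [List.getElem?_map, List.getElem?_range (by omega : k < s.toList.length + 1)]
  rfl

-- closed form of A's 8-offset neighbor count at a cell
lemma pvA_eq (p c q : String) (k : Nat) (hk : k < c.toList.length) :
    isRollPickable p c q (k : Int)
    = decide ((if 1 ≤ k then pvInd p.toList (k-1) + pvInd c.toList (k-1) + pvInd q.toList (k-1) else 0)
        + pvInd p.toList k + pvInd q.toList k
        + (if k + 1 < c.toList.length then pvInd p.toList (k+1) + pvInd c.toList (k+1) + pvInd q.toList (k+1) else 0) < 4) := by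
  unfold isRollPickable pvPositionsToCheck
  simp only [List.foldl_cons, List.foldl_nil, PySem.Str.len_eq,
    show ((0:Int) = -1) = False from by decide, show ((1:Int) = -1) = False from by decide,
    show ((1:Int) = 0) = False from by decide, if_true, if_false]
  rw [decide_eq_decide]
  simp only [show (-1:Int) + (k:Int) = (k:Int) - 1 from by ring,
    show (0:Int) + (k:Int) = (k:Int) from by ring,
    show (1:Int) + (k:Int) = (k:Int) + 1 from by ring]
  have hmid : ¬((k:Int) < 0 ∨ (c.toList.length:Int) ≤ (k:Int)) := by omega
  by_cases h0 : 1 ≤ k <;> by_cases h1 : k + 1 < c.toList.length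
  · -- interior cell: all three columns in range
    simp only [hmid,
      show ¬((k:Int) - 1 < 0 ∨ (c.toList.length:Int) ≤ (k:Int) - 1) from by omega,
      show ¬((k:Int) + 1 < 0 ∨ (c.toList.length:Int) ≤ (k:Int) + 1) from by omega,
      if_false]
    simp only [show ((k:Int) - 1) = ((k-1 : Nat) : Int) from by omega,
      show ((k:Int) + 1) = ((k+1 : Nat) : Int) from by omega,
      PySem.Str.pyGet?_natCast, pvInd, List.getD_eq_getElem?_getD, if_pos h0, if_pos h1]
    constructor <;> intro h <;> linarith
  · -- right edge: k+1 out of range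
    simp only [hmid,
      show ¬((k:Int) - 1 < 0 ∨ (c.toList.length:Int) ≤ (k:Int) - 1) from by omega,
      show ((k:Int) + 1 < 0 ∨ (c.toList.length:Int) ≤ (k:Int) + 1) from by omega,
      if_false, if_true]
    simp only [show ((k:Int) - 1) = ((k-1 : Nat) : Int) from by omega,
      PySem.Str.pyGet?_natCast, pvInd, List.getD_eq_getElem?_getD, if_pos h0, if_neg h1]
    constructor <;> intro h <;> linarith
  · -- left edge: k = 0
    simp only [hmid,
      show ((k:Int) - 1 < 0 ∨ (c.toList.length:Int) ≤ (k:Int) - 1) from by omega,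
      show ¬((k:Int) + 1 < 0 ∨ (c.toList.length:Int) ≤ (k:Int) + 1) from by omega,
      if_false, if_true]
    simp only [show ((k:Int) + 1) = ((k+1 : Nat) : Int) from by omega,
      PySem.Str.pyGet?_natCast, pvInd, List.getD_eq_getElem?_getD, if_neg h0, if_pos h1]
    constructor <;> intro h <;> linarith
  · -- single roll column: k = 0 and length 1
    simp only [hmid,
      show ((k:Int) - 1 < 0 ∨ (c.toList.length:Int) ≤ (k:Int) - 1) from by omega,
      show ((k:Int) + 1 < 0 ∨ (c.toList.length:Int) ≤ (k:Int) + 1) from by omega,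
      if_false, if_true]
    simp only [PySem.Str.pyGet?_natCast, pvInd, List.getD_eq_getElem?_getD, if_neg h0, if_neg h1]
    constructor <;> intro h <;> linarith

-- the 3-column window of one line as prefix-count subtraction
lemma pvWindow (l : List Char) (k L : Nat) (hk : k < L) (hb : min (k+1) (L-1) < l.length) :
    pvCnt l (min L (k+2)) - pvCnt l (k-1)
    = (if 1 ≤ k then pvInd l (k-1) else 0) + pvInd l k + (if k+1 < L then pvInd l (k+1) else 0) := by
  by_cases h0 : 1 ≤ k <;> by_cases h1 : k + 1 < L
  · have a1 : pvCnt l ((k-1)+1) = pvCnt l (k-1) + pvInd l (k-1) := pvCnt_succ _ _ (by omega)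
    rw [show (k-1)+1 = k from by omega] at a1
    have a2 : pvCnt l (k+1) = pvCnt l k + pvInd l k := pvCnt_succ _ _ (by omega)
    have a3 : pvCnt l (k+2) = pvCnt l (k+1) + pvInd l (k+1) := pvCnt_succ _ _ (by omega)
    rw [show min L (k+2) = k+2 from by omega, if_pos h0, if_pos h1]
    linarith
  · have a1 : pvCnt l ((k-1)+1) = pvCnt l (k-1) + pvInd l (k-1) := pvCnt_succ _ _ (by omega)
    rw [show (k-1)+1 = k from by omega] at a1
    have a2 : pvCnt l (k+1) = pvCnt l k + pvInd l k := pvCnt_succ _ _ (by omega)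
    rw [show min L (k+2) = k+1 from by omega, if_pos h0, if_neg h1]
    linarith
  · have hk0 : k = 0 := by omega
    subst hk0
    have a1 : pvCnt l 1 = pvCnt l 0 + pvInd l 0 := pvCnt_succ _ _ (by omega)
    have a2 : pvCnt l 2 = pvCnt l 1 + pvInd l 1 := pvCnt_succ _ _ (by omega)
    rw [show min L 2 = 2 from by omega, if_neg h0, if_pos h1]
    have h00 : pvCnt l 0 = 0 := by simp [pvCnt]
    simp only [show (0:Nat) - 1 = 0 from rfl, h00] at *
    linarith
  · have hk0 : k = 0 := by omega
    subst hk0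
    have a1 : pvCnt l 1 = pvCnt l 0 + pvInd l 0 := pvCnt_succ _ _ (by omega)
    rw [show min L 2 = 1 from by omega, if_neg h0, if_neg h1]
    have h00 : pvCnt l 0 = 0 := by simp [pvCnt]
    simp only [show (0:Nat) - 1 = 0 from rfl, h00] at *
    linarith

-- B's per-cell total equals A's closed-form neighbor count
lemma pvB_eq (p c q : String) (k : Nat) (hk : k < c.toList.length)
    (hp : min (k+1) (c.toList.length-1) < p.toList.length)
    (hq : min (k+1) (c.toList.length-1) < q.toList.length) :
    (if c.toList.getD k ' ' = '@'
     then (pvCnt p.toList (min c.toList.length (k+2)) - pvCnt p.toList (k-1))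
          + (pvCnt c.toList (min c.toList.length (k+2)) - pvCnt c.toList (k-1))
          + (pvCnt q.toList (min c.toList.length (k+2)) - pvCnt q.toList (k-1)) - 1
     else (pvCnt p.toList (min c.toList.length (k+2)) - pvCnt p.toList (k-1))
          + (pvCnt c.toList (min c.toList.length (k+2)) - pvCnt c.toList (k-1))
          + (pvCnt q.toList (min c.toList.length (k+2)) - pvCnt q.toList (k-1)))
    = (if 1 ≤ k then pvInd p.toList (k-1) + pvInd c.toList (k-1) + pvInd q.toList (k-1) else 0)
      + pvInd p.toList k + pvInd q.toList k
      + (if k + 1 < c.toList.length then pvInd p.toList (k+1) + pvInd c.toList (k+1) + pvInd q.toList (k+1) else 0) := by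
  rw [pvWindow p.toList k c.toList.length hk hp,
      pvWindow c.toList k c.toList.length hk (by omega),
      pvWindow q.toList k c.toList.length hk hq]
  have hcind : pvInd c.toList k = (if c.toList.getD k ' ' = '@' then 1 else 0) := rfl
  by_cases hAt : c.toList.getD k ' ' = '@' <;>
    by_cases h0 : 1 ≤ k <;> by_cases h1 : k + 1 < c.toList.length <;>
      simp only [hAt, h0, h1, hcind, ite_true, ite_false] <;>
      ring

-- ===== VERDICT (by name: the statement is the Claim_ definition above) =====
theorem countRollsInLine_spec : Claim_equal_countRollsInLine := by
  intro p c q _ hpre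
  unfold Spec_countRollsInLine countRollsInLine countRollsInLine_alt
  simp only [PySem.Str.len_eq]
  rw [PySem.List.pyRange_zero_nat, List.foldl_map, List.foldl_map]
  apply PySem.List.foldl_congr_mem'
  intro k hkmem acc
  rw [List.mem_range] at hkmem
  by_cases hdot : (PySem.Str.pyGet? c (k:Int)).getD ' ' = '.'
  · simp only [if_pos hdot]
  · simp only [if_neg hdot]
    have hc' : c.toList.getD k ' ' ≠ '.' := by
      simpa [List.getD_eq_getElem?_getD] using hdot
    obtain ⟨hp, hq⟩ := hpre k hkmem hc'
    rw [pvA_eq p c q k hkmem]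
    rw [show max 0 ((k:Int) - 1) = ((k-1 : Nat) : Int) from by omega,
        show min ((c.toList.length:Int) - 1) ((k:Int) + 1) + 1 = ((min c.toList.length (k+2) : Nat) : Int) from by omega]
    rw [pvPrefix_get p _ (by omega), pvPrefix_get p _ (by omega),
        pvPrefix_get c _ (by omega), pvPrefix_get c _ (by omega),
        pvPrefix_get q _ (by omega), pvPrefix_get q _ (by omega)]
    rw [show (PySem.Str.pyGet? c (k:Int)).getD ' ' = c.toList.getD k ' ' from by
          simp [List.getD_eq_getElem?_getD]]
    rw [pvB_eq p c q k hkmem hp hq]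
    simp only [decide_eq_true_eq]
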